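-- pv_equiv track=rewrite | github.com/KanakV/ED5215-Motion-Planning | planner.py | simple_planner
-- ===== SOURCE A (Python) =====
-- def simple_planner(grid, start, goal):
--     path = []
--     x, y = start
--     gx, gy = goal
--
--     while (x, y) != (gx, gy):
--         if x < gx:
--             x += 1
--         elif x > gx:
--             x -= 1
--         elif y < gy:
--             y += 1
--         elif y > gy:
--             y -= 1
--
--         path.append((x, y))
--
--     return path
-- ===== SOURCE B (Python) =====
-- def simple_planner(grid, start, goal):
--     x, y = start
--     gx, gy = goal
--     sx = 1 if gx >= x else -1
--     sy = 1 if gy >= y else -1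
--     x_leg = [(nx, y) for nx in range(x + sx, gx + sx, sx)]
--     y_leg = [(gx, ny) for ny in range(y + sy, gy + sy, sy)]
--     return x_leg + y_leg
-- ===== Notes on version B (the rewrite author's own statement) =====
-- stated objective: simpler
-- what changed: Replaces the step-by-step while loop (mutate x/y, append each cell) with a closed-form construction: the x-leg and y-leg are each emitted as one comprehension over a range, then concatenated.
import Mathlib
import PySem

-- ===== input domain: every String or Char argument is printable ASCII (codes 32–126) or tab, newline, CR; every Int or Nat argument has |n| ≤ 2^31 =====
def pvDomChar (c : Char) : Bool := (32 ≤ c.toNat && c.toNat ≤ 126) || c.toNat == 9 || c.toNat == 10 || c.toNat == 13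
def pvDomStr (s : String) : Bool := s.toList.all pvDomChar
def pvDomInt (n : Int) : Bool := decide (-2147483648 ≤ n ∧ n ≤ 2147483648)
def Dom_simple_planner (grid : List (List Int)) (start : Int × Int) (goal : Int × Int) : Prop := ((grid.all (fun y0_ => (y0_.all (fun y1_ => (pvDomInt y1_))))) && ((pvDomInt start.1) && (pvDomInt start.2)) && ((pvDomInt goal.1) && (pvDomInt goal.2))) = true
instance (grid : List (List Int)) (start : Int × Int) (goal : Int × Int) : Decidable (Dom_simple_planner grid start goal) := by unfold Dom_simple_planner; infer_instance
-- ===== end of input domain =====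

-- B replaces the step-by-step while loop by emitting the x-leg and y-leg as range comprehensions (objective: simpler).

-- ===== PORT A =====
-- the while loop: at each iteration move one step (x first, then y) and append the new cell
def simple_planner_loop (gx gy x y : Int) : List (Int × Int) :=
  if h : ¬ ((x, y) = (gx, gy)) then
    let p : Int × Int :=
      if x < gx then (x + 1, y)
      else if x > gx then (x - 1, y)
      else if y < gy then (x, y + 1)
      else if y > gy then (x, y - 1)
      else (x, y)   -- unreachable: the loop guard h rules this case out
    p :: simple_planner_loop gx gy p.1 p.2
  else []
termination_by ((gx - x).natAbs + (gy - y).natAbs)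
decreasing_by
  simp only [Prod.mk.injEq, not_and] at h
  split_ifs with h1 h2 h3 h4 <;> simp <;> omega

def simple_planner (grid : List (List Int)) (start : Int × Int) (goal : Int × Int) : List (Int × Int) :=
  simple_planner_loop goal.1 goal.2 start.1 start.2

-- ===== PORT B =====
def simple_planner_alt (grid : List (List Int)) (start : Int × Int) (goal : Int × Int) : List (Int × Int) :=
  let x := start.1; let y := start.2
  let gx := goal.1; let gy := goal.2
  let sx : Int := if gx ≥ x then 1 else -1
  let sy : Int := if gy ≥ y then 1 else -1
  ((PySem.List.pyRange (x + sx) (gx + sx) sx).map (fun nx => (nx, y))) ++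
  ((PySem.List.pyRange (y + sy) (gy + sy) sy).map (fun ny => (gx, ny)))

-- ===== PRECONDITION & SPEC =====
def Spec_simple_planner (grid : List (List Int)) (start : Int × Int) (goal : Int × Int) (out : List (Int × Int)) : Prop := out = simple_planner_alt grid start goal
instance (grid : List (List Int)) (start : Int × Int) (goal : Int × Int) (out : List (Int × Int)) : Decidable (Spec_simple_planner grid start goal out) := by unfold Spec_simple_planner; infer_instance

-- ===== CLAIM (what is proved, stated in full; the proofs are below) =====
def Claim_equal_simple_planner : Prop := ∀ (grid : List (List Int)) (start : Int × Int) (goal : Int × Int), Dom_simple_planner grid start goal → Spec_simple_planner grid start goal (simple_planner grid start goal)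

-- ===== LEMMAS AND PROOFS =====

-- once x = gx, the loop is exactly the y-leg
theorem simple_planner_loop_yleg (gx gy y : Int) :
    simple_planner_loop gx gy gx y =
      (PySem.List.pyRange (y + (if gy ≥ y then 1 else -1)) (gy + (if gy ≥ y then 1 else -1))
        (if gy ≥ y then 1 else -1)).map (fun ny => (gx, ny)) := by
  by_cases hlt : y < gy
  · have : gy ≥ y := le_of_lt hlt
    rw [if_pos this]
    rw [PySem.List.pyRange_one_cons (by omega : y + 1 < gy + 1)]
    rw [simple_planner_loop]
    rw [dif_pos (by simp; omega)]
    simp only [lt_irrefl, if_false, gt_iff_lt, if_pos hlt]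
    have ih := simple_planner_loop_yleg gx gy (y + 1)
    by_cases h2 : y + 1 = gy
    · subst h2
      rw [simple_planner_loop, dif_neg (by simp)] at ih ⊢
      simp [PySem.List.pyRange_one_eq_nil (by omega : y + 1 + 1 ≤ y + 1 + 1)]
    · rw [ih, if_pos (by omega : gy ≥ y + 1)]
      simp
  · by_cases hgt : y > gy
    · have hns : ¬ gy ≥ y := by omega
      rw [if_neg hns]
      rw [PySem.List.pyRange_neg_one_cons (by omega : gy + -1 < y + -1)]
      rw [simple_planner_loop]
      rw [dif_pos (by simp; omega)]
      simp only [lt_irrefl, if_false, gt_iff_lt, if_pos hgt]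
      have hne : ¬ y < gy := by omega
      rw [if_neg hne]
      have ih := simple_planner_loop_yleg gx gy (y - 1)
      by_cases h2 : y - 1 = gy
      · rw [h2] at ih ⊢
        rw [simple_planner_loop, dif_neg (by simp)] at ih ⊢
        simp
        exact ⟨by omega, PySem.List.pyRange_neg_one_eq_nil (by omega)⟩
      · rw [ih, if_neg (by omega : ¬ gy ≥ y - 1)]
        simp
        constructor <;> ring_nf
    · have : y = gy := by omega
      subst this
      rw [simple_planner_loop, dif_neg (by simp)]
      rw [if_pos (le_refl y)]
      rw [PySem.List.pyRange_one_eq_nil (by omega : y + 1 ≤ y + 1)]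
      simp
termination_by (gy - y).natAbs
decreasing_by all_goals omega

-- the full loop is the x-leg followed by the y-leg
theorem simple_planner_loop_eq (gx gy x y : Int) :
    simple_planner_loop gx gy x y =
      ((PySem.List.pyRange (x + (if gx ≥ x then 1 else -1)) (gx + (if gx ≥ x then 1 else -1))
        (if gx ≥ x then 1 else -1)).map (fun nx => (nx, y))) ++
      ((PySem.List.pyRange (y + (if gy ≥ y then 1 else -1)) (gy + (if gy ≥ y then 1 else -1))
        (if gy ≥ y then 1 else -1)).map (fun ny => (gx, ny))) := by
  by_cases hx : x = gx
  · subst hx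
    rw [simple_planner_loop_yleg]
    rw [if_pos (le_refl x), PySem.List.pyRange_one_eq_nil (by omega : x + 1 ≤ x + 1)]
    simp
  · by_cases hlt : x < gx
    · rw [if_pos (by omega : gx ≥ x)]
      rw [PySem.List.pyRange_one_cons (by omega : x + 1 < gx + 1)]
      rw [simple_planner_loop]
      rw [dif_pos (by simp [hx])]
      simp only [if_pos hlt]
      have ih := simple_planner_loop_eq gx gy (x + 1) y
      by_cases h2 : x + 1 = gx
      · rw [ih, h2, if_pos (le_refl gx),
            PySem.List.pyRange_one_eq_nil (by omega : gx + 1 ≤ gx + 1)]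
        simp
      · rw [ih, if_pos (by omega : gx ≥ x + 1)]
        simp
    · have hgt : x > gx := by omega
      rw [if_neg (by omega : ¬ gx ≥ x)]
      rw [PySem.List.pyRange_neg_one_cons (by omega : gx + -1 < x + -1)]
      rw [simple_planner_loop]
      rw [dif_pos (by simp [hx])]
      rw [if_neg (by omega : ¬ x < gx), if_pos hgt]
      show (x - 1, y) :: simple_planner_loop gx gy (x - 1) y = _
      have ih := simple_planner_loop_eq gx gy (x - 1) y
      by_cases h2 : x - 1 = gx
      · rw [ih, h2, if_pos (le_refl gx),
            PySem.List.pyRange_one_eq_nil (by omega : gx + 1 ≤ gx + 1)]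
        simp
        exact ⟨by omega, PySem.List.pyRange_neg_one_eq_nil (by omega)⟩
      · rw [ih, if_neg (by omega : ¬ gx ≥ x - 1)]
        simp
        constructor <;> ring_nf
termination_by (gx - x).natAbs
decreasing_by all_goals omega

-- ===== VERDICT (by name: the statement is the Claim_ definition above) =====
theorem simple_planner_spec : Claim_equal_simple_planner := by
  intro grid start goal _
  unfold Spec_simple_planner simple_planner simple_planner_alt
  exact simple_planner_loop_eq goal.1 goal.2 start.1 start.2
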